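-- pv_equiv track=rewrite | github.com/KosuriLab/errorCorrect | analysis/scripts/parse.py | updateIns
-- ===== SOURCE A (Python) =====
-- def updateIns(err_list):
--     """
--     Cumulatively renumber the positions of the errors caused by insertions
--     padding the reference sequence.
--
--     Parameters:
--     -----------
--     err_list :: [(Pos, Type, Diff), ...]
--         Sorted list of tuples corresponding to our errors
--
--     Returns:
--     --------
--     mod_list :: [(Pos, Type, Diff), ...]
--
--     Example:
--     --------
--     Update the length of all differences by compensating for insertions. We can
--     think of the algorithm as such:
--
--         0, M, ...  = 0  - 0
--         2, I, A    = 2  - 0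
--         7, M, ...  = 7  - A
--         9, I, B    = 9  - A
--         12, M, ... = 12 - A - B
--         ...
--
--     Basically, we subtract the length of an insertion from the positions of
--     every error downstream of it. If there are more than one insertion, we
--     subtract the cumulative length of the two insertions.
--
--     """
--     cum_len = 0
--     mod_list = []
--     for i in err_list:
--         mod_list.append((i[0] - cum_len, i[1], i[2]))
--         if i[1] == 'I' or i[1] == 'S':
--             cum_len = cum_len + len(i[2])
--     return mod_list
-- ===== SOURCE B (Python) =====
-- from itertools import accumulate
--
-- def updateIns(err_list):
--     # exclusive prefix sums of insertion lengths, then a zip/map pass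
--     offsets = list(accumulate(
--         (len(d) if t in ('I', 'S') else 0 for _, t, d in err_list),
--         initial=0))
--     return [(p - off, t, d) for (p, t, d), off in zip(err_list, offsets)]
-- ===== Notes on version B (the rewrite author's own statement) =====
-- stated objective: alternative
-- what changed: Replaces the single loop threading a running cum_len accumulator by two separate passes: build an exclusive prefix-sum offset table with itertools.accumulate, then zip it with the list to shift positions.
import Mathlib
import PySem

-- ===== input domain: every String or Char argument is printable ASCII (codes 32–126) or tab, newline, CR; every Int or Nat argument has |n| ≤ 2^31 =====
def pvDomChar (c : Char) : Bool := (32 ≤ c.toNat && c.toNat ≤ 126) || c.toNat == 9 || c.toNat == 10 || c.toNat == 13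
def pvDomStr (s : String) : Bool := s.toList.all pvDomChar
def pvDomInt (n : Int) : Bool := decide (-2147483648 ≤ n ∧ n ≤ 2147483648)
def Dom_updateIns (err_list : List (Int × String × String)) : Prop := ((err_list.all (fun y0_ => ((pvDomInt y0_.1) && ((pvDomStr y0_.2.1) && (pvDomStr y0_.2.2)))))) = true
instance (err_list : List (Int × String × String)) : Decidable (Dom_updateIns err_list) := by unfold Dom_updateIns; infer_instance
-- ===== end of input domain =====

-- B separates table-building (exclusive prefix sums) from the mapping pass instead of threading a running accumulator (objective: alternative decomposition).


-- ===== PORT A =====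
-- literal port of A: one loop threading (cum_len, mod_list)
def updateIns (err_list : List (Int × String × String)) : List (Int × String × String) :=
  (err_list.foldl
    (fun (st : Int × List (Int × String × String)) i =>
      let mod_list := st.2 ++ [(i.1 - st.1, i.2.1, i.2.2)]
      let cum_len := if i.2.1 == "I" || i.2.1 == "S" then st.1 + PySem.Str.len i.2.2 else st.1
      (cum_len, mod_list))
    (0, [])).2

-- ===== PORT B =====
-- port of B: per-element increments, exclusive prefix-sum offset table (scanl = accumulate with initial=0), then a zip/map pass
def pvInc (i : Int × String × String) : Int :=
  if i.2.1 == "I" || i.2.1 == "S" then PySem.Str.len i.2.2 else 0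

def updateIns_alt (err_list : List (Int × String × String)) : List (Int × String × String) :=
  let offsets := List.scanl (· + ·) 0 (err_list.map pvInc)
  (err_list.zip offsets).map (fun p => (p.1.1 - p.2, p.1.2.1, p.1.2.2))

-- ===== PRECONDITION & SPEC =====
def Spec_updateIns (err_list : List (Int × String × String)) (out : List (Int × String × String)) : Prop := out = updateIns_alt err_list
instance (err_list : List (Int × String × String)) (out : List (Int × String × String)) : Decidable (Spec_updateIns err_list out) := by unfold Spec_updateIns; infer_instance

-- ===== CLAIM (what is proved, stated in full; the proofs are below) =====
def Claim_equal_updateIns : Prop := ∀ (err_list : List (Int × String × String)), Dom_updateIns err_list → Spec_updateIns err_list (updateIns err_list)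

-- ===== LEMMAS AND PROOFS =====

-- ===== VERDICT (by name: the statement is the Claim_ definition above) =====
lemma foldl_zip_scanl (l : List (Int × String × String)) (c : Int)
    (acc : List (Int × String × String)) :
    (l.foldl
      (fun (st : Int × List (Int × String × String)) i =>
        let mod_list := st.2 ++ [(i.1 - st.1, i.2.1, i.2.2)]
        let cum_len := if i.2.1 == "I" || i.2.1 == "S" then st.1 + PySem.Str.len i.2.2 else st.1
        (cum_len, mod_list))
      (c, acc)).2
    = acc ++ (l.zip (List.scanl (· + ·) c (l.map pvInc))).map
        (fun p => (p.1.1 - p.2, p.1.2.1, p.1.2.2)) := by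
  induction l generalizing c acc with
  | nil => simp
  | cons i l ih =>
    simp only [List.foldl_cons, List.map_cons, List.scanl_cons, List.zip_cons_cons,
      List.map_cons]
    rw [ih]
    simp [pvInc]
    split <;> simp_all

theorem updateIns_spec : Claim_equal_updateIns := by
  intro el _
  unfold Spec_updateIns updateIns updateIns_alt
  simpa using foldl_zip_scanl el 0 []
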